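-- pv_equiv track=rewrite | github.com/Donny-GUI/loz | util.py | is_row_non_uniform
-- ===== SOURCE A (Python) =====
-- def is_row_non_uniform(row: list[tuple[int, int, int]]) -> bool:
--     """
--     Determine if a row of pixels is not uniform, meaning it contains more than one color.
--
--     Args:
--         row (list): A list representing a row of pixels.
--
--     Returns:
--         bool: True if the row contains more than one color, False otherwise.
--     """
--     if not row:
--         return False
--
--     first_pixel = row[0]
--     for pixel in row[1:]:
--         if pixel != first_pixel:
--             return True
--
--     return False
-- ===== SOURCE B (Python) =====
-- def is_row_non_uniform(row: list[tuple[int, int, int]]) -> bool: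
--     """True iff the row contains more than one distinct color."""
--     return len(set(row)) > 1
-- ===== Notes on version B (the rewrite author's own statement) =====
-- stated objective: simpler
-- what changed: Replaces the first-pixel comparison scan (with empty guard and early return) by building the set of distinct pixels and testing its size; no faster claim.
import Mathlib
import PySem

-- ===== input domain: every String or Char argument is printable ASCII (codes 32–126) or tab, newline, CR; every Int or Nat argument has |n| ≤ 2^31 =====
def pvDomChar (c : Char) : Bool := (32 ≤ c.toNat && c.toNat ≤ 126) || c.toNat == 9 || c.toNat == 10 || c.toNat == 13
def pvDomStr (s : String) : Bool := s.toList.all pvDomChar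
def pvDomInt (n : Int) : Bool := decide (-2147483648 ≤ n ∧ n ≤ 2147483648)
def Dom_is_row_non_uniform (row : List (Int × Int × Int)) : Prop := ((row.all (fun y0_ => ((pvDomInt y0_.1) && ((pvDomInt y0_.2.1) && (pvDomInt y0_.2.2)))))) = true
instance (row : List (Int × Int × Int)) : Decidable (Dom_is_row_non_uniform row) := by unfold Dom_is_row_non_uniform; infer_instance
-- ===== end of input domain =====

-- B replaces A's first-pixel comparison scan by testing the size of the set of distinct pixels (simpler, same cost).


-- ===== PORT A =====
-- if not row: return False; first_pixel = row[0]; for pixel in row[1:]: if pixel != first_pixel: return True; return False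
def is_row_non_uniform (row : List (Int × Int × Int)) : Bool :=
  match row with
  | [] => false
  | first_pixel :: _ =>
    (PySem.List.slice row (some 1) none).any (fun pixel => pixel != first_pixel)

-- ===== PORT B =====
-- return len(set(row)) > 1
def is_row_non_uniform_alt (row : List (Int × Int × Int)) : Bool :=
  decide (1 < PySem.Set.len (PySem.Set.ofList row))

-- ===== PRECONDITION & SPEC =====
def Spec_is_row_non_uniform (row : List (Int × Int × Int)) (out : Bool) : Prop := out = is_row_non_uniform_alt row
instance (row : List (Int × Int × Int)) (out : Bool) : Decidable (Spec_is_row_non_uniform row out) := by unfold Spec_is_row_non_uniform; infer_instance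

-- ===== CLAIM (what is proved, stated in full; the proofs are below) =====
def Claim_equal_is_row_non_uniform : Prop := ∀ (row : List (Int × Int × Int)), Dom_is_row_non_uniform row → Spec_is_row_non_uniform row (is_row_non_uniform row)

-- ===== LEMMAS AND PROOFS =====

theorem pv_length_add_ge {α : Type} [BEq α] (s : PySem.Set α) (x : α) :
    s.length ≤ (PySem.Set.add s x).length := by
  unfold PySem.Set.add
  split <;> simp

theorem pv_length_foldl_add_ge {α : Type} [BEq α] (l : List α) (s : PySem.Set α) :
    s.length ≤ (l.foldl PySem.Set.add s).length := by
  induction l generalizing s with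
  | nil => simp
  | cons x l ih => exact le_trans (pv_length_add_ge s x) (ih _)

theorem pv_decide_one_lt_cast (n : Nat) : decide ((1 : Int) < (n : Int)) = decide (1 < n) := by
  simp

theorem pv_foldl_add_any {α : Type} [BEq α] [LawfulBEq α] (l : List α) (a : α) :
    decide (1 < (l.foldl PySem.Set.add [a]).length) = l.any (fun x => x != a) := by
  induction l with
  | nil => simp
  | cons x l ih =>
    simp only [List.foldl_cons, List.any_cons]
    by_cases h : x = a
    · subst h
      have hx : PySem.Set.add [x] x = [x] := by
        unfold PySem.Set.add; simp [PySem.Set.contains]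
      simp only [hx, ih]
      simp
    · have hx : PySem.Set.add [a] x = [a, x] := by
        unfold PySem.Set.add; simp [PySem.Set.contains, h]
      simp only [hx]
      have h2 := pv_length_foldl_add_ge l [a, x]
      simp only [List.length_cons, List.length_nil] at h2
      have h3 : 1 < (l.foldl PySem.Set.add [a, x]).length := by omega
      simp [h, h3]

-- ===== VERDICT (by name: the statement is the Claim_ definition above) =====
theorem is_row_non_uniform_spec : Claim_equal_is_row_non_uniform := by
  intro row _
  unfold Spec_is_row_non_uniform is_row_non_uniform is_row_non_uniform_alt
  match row with
  | [] => simp [PySem.Set.ofList, PySem.Set.len]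
  | a :: l =>
    have hs : PySem.List.slice (a :: l) (some 1) none = l := by
      simp [PySem.List.slice_from_one]
    have hof : PySem.Set.ofList (a :: l) = l.foldl PySem.Set.add [a] := by
      rw [PySem.Set.ofList_eq_foldl]
      simp [PySem.Set.add, PySem.Set.contains]
    simp only [hs, hof, PySem.Set.len]
    rw [pv_decide_one_lt_cast]
    exact (pv_foldl_add_any l a).symm
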